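-- pv_equiv track=rewrite | github.com/1001harshit/aerotriage | backend/hybrid_severity.py | apply_red_flag_rules
-- ===== SOURCE A (Python) =====
-- from typing import List, Optional, Tuple
--
-- RED_FLAG_RULES: List[Tuple[List[str], int]] = [
--     (["cardiac arrest", "not breathing", "unconscious", "no pulse", "severe bleeding", "stroke", "unresponsive"], 1),
--     (["chest pain", "difficulty breathing", "shortness of breath", "fainting", "fainted", "confusion", "severe bleeding", "can't breathe", "severe abdominal pain", "vomiting blood", "coughing up blood"], 2),
--     (["wheezing", "tight chest", "heavy bleeding", "head injury", "hit head", "possible fracture"], 3),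
-- ]
--
-- SEVERITY_MIN = 1
--
-- SEVERITY_MAX = 5
--
-- def apply_red_flag_rules(text: str, base_severity: int) -> int:
--     """
--     If text contains dangerous indicators, return the escalated severity; else base_severity.
--     Final value is clamped between 1 and 5.
--     """
--     t = (text or "").strip().lower()
--     if not t:
--         return max(SEVERITY_MIN, min(SEVERITY_MAX, base_severity))
--
--     for phrases, severity in RED_FLAG_RULES:
--         if any(p in t for p in phrases):
--             return max(SEVERITY_MIN, min(SEVERITY_MAX, severity))
--     return max(SEVERITY_MIN, min(SEVERITY_MAX, base_severity))
-- ===== SOURCE B (Python) =====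
-- RED_FLAG_RULES = [
--     (["cardiac arrest", "not breathing", "unconscious", "no pulse", "severe bleeding", "stroke", "unresponsive"], 1),
--     (["chest pain", "difficulty breathing", "shortness of breath", "fainting", "fainted", "confusion", "severe bleeding", "can't breathe", "severe abdominal pain", "vomiting blood", "coughing up blood"], 2),
--     (["wheezing", "tight chest", "heavy bleeding", "head injury", "hit head", "possible fracture"], 3),
-- ]
-- SEVERITY_MIN = 1
-- SEVERITY_MAX = 5
--
-- def apply_red_flag_rules(text: str, base_severity: int) -> int:
--     t = (text or "").strip().lower()
--     if not t:
--         return max(SEVERITY_MIN, min(SEVERITY_MAX, base_severity))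
--     matches = [sev for phrases, sev in RED_FLAG_RULES if any(p in t for p in phrases)]
--     return max(SEVERITY_MIN, min(SEVERITY_MAX, min(matches) if matches else base_severity))
-- ===== Notes on version B (the rewrite author's own statement) =====
-- stated objective: alternative
-- what changed: Replaces the first-match early-return loop by collecting the severities of all matching rules and taking their minimum (correct because the rules are ordered by ascending severity), falling back to the clamped base severity when no rule matches.
import Mathlib
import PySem

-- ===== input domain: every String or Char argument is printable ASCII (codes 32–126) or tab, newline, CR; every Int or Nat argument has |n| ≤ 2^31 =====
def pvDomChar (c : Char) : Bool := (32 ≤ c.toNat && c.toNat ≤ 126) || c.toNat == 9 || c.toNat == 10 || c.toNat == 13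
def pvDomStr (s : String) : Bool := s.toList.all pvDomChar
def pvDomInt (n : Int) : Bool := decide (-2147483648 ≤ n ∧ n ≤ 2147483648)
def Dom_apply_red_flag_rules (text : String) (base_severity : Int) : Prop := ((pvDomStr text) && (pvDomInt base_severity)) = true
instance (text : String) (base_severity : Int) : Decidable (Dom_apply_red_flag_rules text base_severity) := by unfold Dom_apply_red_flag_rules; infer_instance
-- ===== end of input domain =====

-- B collects the severities of all matching rules and takes their minimum (the rules are
-- ordered by ascending severity), instead of A's first-match early-return loop. Objective: alternative decomposition.

-- ===== PORT A =====
def RED_FLAG_RULES : List (List String × Int) :=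
  [(["cardiac arrest", "not breathing", "unconscious", "no pulse", "severe bleeding", "stroke", "unresponsive"], 1),
   (["chest pain", "difficulty breathing", "shortness of breath", "fainting", "fainted", "confusion", "severe bleeding", "can't breathe", "severe abdominal pain", "vomiting blood", "coughing up blood"], 2),
   (["wheezing", "tight chest", "heavy bleeding", "head injury", "hit head", "possible fracture"], 3)]

def pvClamp (x : Int) : Int := max 1 (min 5 x)

-- the for-loop of A: first matching rule returns its clamped severity
def pvLoopA (t : String) (base : Int) : List (List String × Int) → Int
  | [] => pvClamp base
  | (phrases, severity) :: rest =>
      if phrases.any (fun p => PySem.Str.isIn p t) then pvClamp severity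
      else pvLoopA t base rest

def apply_red_flag_rules (text : String) (base_severity : Int) : Int :=
  let t := PySem.Str.lower (PySem.Str.strip text)
  if t = "" then pvClamp base_severity
  else pvLoopA t base_severity RED_FLAG_RULES

-- ===== PORT B =====
def apply_red_flag_rules_alt (text : String) (base_severity : Int) : Int :=
  let t := PySem.Str.lower (PySem.Str.strip text)
  if t = "" then pvClamp base_severity
  else
    let ms := (RED_FLAG_RULES.filter (fun r => r.1.any (fun p => PySem.Str.isIn p t))).map (fun r => r.2)
    pvClamp (match PySem.List.min? ms (fun x => x) with
             | some m => m
             | none => base_severity)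

-- ===== PRECONDITION & SPEC =====
def Spec_apply_red_flag_rules (text : String) (base_severity : Int) (out : Int) : Prop := out = apply_red_flag_rules_alt text base_severity
instance (text : String) (base_severity : Int) (out : Int) : Decidable (Spec_apply_red_flag_rules text base_severity out) := by unfold Spec_apply_red_flag_rules; infer_instance

-- ===== CLAIM (what is proved, stated in full; the proofs are below) =====
def Claim_equal_apply_red_flag_rules : Prop := ∀ (text : String) (base_severity : Int), Dom_apply_red_flag_rules text base_severity → Spec_apply_red_flag_rules text base_severity (apply_red_flag_rules text base_severity)

-- ===== LEMMAS AND PROOFS =====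

-- ===== VERDICT (by name: the statement is the Claim_ definition above) =====
theorem pv_key (t : String) (base : Int) :
    (if t = "" then pvClamp base else pvLoopA t base RED_FLAG_RULES)
    = (if t = "" then pvClamp base
       else
        let ms := (RED_FLAG_RULES.filter (fun r => r.1.any (fun p => PySem.Str.isIn p t))).map (fun r => r.2)
        pvClamp (match PySem.List.min? ms (fun x => x) with
                 | some m => m
                 | none => base)) := by
  by_cases h0 : t = ""
  · simp [h0]
  · rw [if_neg h0, if_neg h0]
    by_cases h1 : (["cardiac arrest", "not breathing", "unconscious", "no pulse", "severe bleeding", "stroke", "unresponsive"] : List String).any (fun p => PySem.Str.isIn p t) <;>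
    by_cases h2 : (["chest pain", "difficulty breathing", "shortness of breath", "fainting", "fainted", "confusion", "severe bleeding", "can't breathe", "severe abdominal pain", "vomiting blood", "coughing up blood"] : List String).any (fun p => PySem.Str.isIn p t) <;>
    by_cases h3 : (["wheezing", "tight chest", "heavy bleeding", "head injury", "hit head", "possible fracture"] : List String).any (fun p => PySem.Str.isIn p t) <;>
    simp only [RED_FLAG_RULES, pvLoopA, List.filter, List.map, h1, h2, h3, if_true, if_false,
      cond_true, cond_false] <;>
    simp [PySem.List.min?, pvClamp]

-- ===== VERDICT (by name: the statement is the Claim_ definition above) =====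
theorem apply_red_flag_rules_spec : Claim_equal_apply_red_flag_rules := by
  intro text base_severity _
  exact pv_key (PySem.Str.lower (PySem.Str.strip text)) base_severity
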